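-- pv_equiv track=rewrite | github.com/DarenSalter71/pokemon_tcg_deal_finder_app | scraper.py | get_card_id
-- ===== SOURCE A (Python) =====
-- def get_card_id(title):
--     for word in title.split(" "):
--         if '/' in word or '#' in word:
--             word = word.replace('#','')
--             if '/' in word:
--                 word = word.split("/")[0]
--             return word
--     return None
-- ===== SOURCE B (Python) =====
-- def get_card_id(title):
--     # Single char-level pass over the title instead of split-into-words:
--     # accumulate the current space-delimited token; once it contains '#' or '/',
--     # finish the token and clean it (drop '#'s, cut at first '/').
--     cur = []
--     hit = False
--     for c in title:
--         if c == ' ':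
--             if hit:
--                 break
--             cur = []
--         else:
--             cur.append(c)
--             if c == '#' or c == '/':
--                 hit = True
--     if not hit:
--         return None
--     out = []
--     for ch in cur:
--         if ch == '/':
--             break
--         if ch != '#':
--             out.append(ch)
--     return ''.join(out)
-- ===== Notes on version B (the rewrite author's own statement) =====
-- stated objective: alternative
-- what changed: Replaces split-the-title-into-words plus a per-word membership/replace/split cleanup with a single character-level scan that accumulates the current space-delimited token, stops once it contains '#' or '/', and cleans it in one pass (skip '#', cut at first '/').
import Mathlib
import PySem

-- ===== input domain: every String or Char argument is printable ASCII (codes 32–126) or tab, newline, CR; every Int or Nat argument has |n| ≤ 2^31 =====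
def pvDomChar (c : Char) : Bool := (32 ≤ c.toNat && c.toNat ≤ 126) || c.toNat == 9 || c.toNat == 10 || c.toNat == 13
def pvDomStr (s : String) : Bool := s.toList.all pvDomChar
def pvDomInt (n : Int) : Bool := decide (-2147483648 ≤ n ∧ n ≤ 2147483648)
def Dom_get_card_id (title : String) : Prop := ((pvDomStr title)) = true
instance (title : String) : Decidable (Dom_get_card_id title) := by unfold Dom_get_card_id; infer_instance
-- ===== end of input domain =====

-- B replaces A's split-into-words loop by a single character-level scan with the same return value (objective: alternative).

-- ===== PORT A =====
-- word = word.replace('#',''); if '/' in word: word = word.split("/")[0]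
def cleanA (word : List Char) : List Char :=
  let w := PySem.Chars.replace word ['#'] []
  if PySem.Chars.isIn ['/'] w then PySem.List.pyGetD (PySem.Chars.splitOn w ['/']) 0 [] else w

-- the for-word loop with its early return
def loopA : List (List Char) → Option (List Char)
  | [] => none
  | word :: rest =>
    if PySem.Chars.isIn ['/'] word || PySem.Chars.isIn ['#'] word then some (cleanA word)
    else loopA rest

def get_card_id (title : String) : Option String :=
  (loopA (PySem.Chars.splitOn title.toList [' '])).map String.ofList

-- ===== PORT B =====
-- the character loop: current token cur, flag hit; ' ' breaks (if hit) or resets cur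
def loopB : List Char → List Char → Bool → Option (List Char)
  | [], cur, hit => if hit then some cur else none
  | c :: rest, cur, hit =>
    if c = ' ' then (if hit then some cur else loopB rest [] false)
    else loopB rest (cur ++ [c]) (if c = '#' ∨ c = '/' then true else hit)

-- the cleaning loop: break at '/', skip '#'
def cleanB : List Char → List Char
  | [] => []
  | c :: rest => if c = '/' then [] else if c = '#' then cleanB rest else c :: cleanB rest

def get_card_id_alt (title : String) : Option String :=
  (loopB title.toList [] false).map (fun cs => String.ofList (cleanB cs))

-- ===== PRECONDITION & SPEC =====
def Spec_get_card_id (title : String) (out : Option String) : Prop := out = get_card_id_alt title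
instance (title : String) (out : Option String) : Decidable (Spec_get_card_id title out) := by unfold Spec_get_card_id; infer_instance

-- ===== CLAIM (what is proved, stated in full; the proofs are below) =====
def Claim_equal_get_card_id : Prop := ∀ (title : String), Dom_get_card_id title → Spec_get_card_id title (get_card_id title)

-- ===== LEMMAS AND PROOFS =====

def splitRec (s : Char) : List Char → List (List Char)
  | [] => [[]]
  | c :: rest => if c = s then [] :: splitRec s rest else (splitRec s rest).modifyHead (c :: ·)

lemma splitRec_ne_nil (s : Char) (l : List Char) : splitRec s l ≠ [] := by
  induction l with
  | nil => simp [splitRec]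
  | cons c rest ih =>
    simp only [splitRec]
    split
    · simp
    · cases h : splitRec s rest with
      | nil => exact absurd h ih
      | cons a t => simp [List.modifyHead]

lemma splitOn_go_char (s : Char) :
    ∀ (fuel : Nat) (l cur : List Char) (acc : List (List Char)), l.length ≤ fuel →
      PySem.Chars.splitOn.go [s] fuel l cur acc
        = acc.reverse ++ (splitRec s l).modifyHead (cur.reverse ++ ·) := by
  intro fuel
  induction fuel with
  | zero =>
    intro l cur acc h
    have : l = [] := by cases l <;> simp_all
    subst this
    simp [PySem.Chars.splitOn.go, splitRec]
  | succ n ih =>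
    intro l cur acc h
    cases l with
    | nil => simp [PySem.Chars.splitOn.go, splitRec]
    | cons c rest =>
      rw [PySem.Chars.splitOn.go]
      by_cases hc : s = c
      · subst hc
        have hp : List.isPrefixOf [s] (s :: rest) = true := by simp [List.isPrefixOf]
        simp only [hp, if_pos]
        rw [ih _ _ _ (by simpa using Nat.le_of_succ_le_succ h)]
        simp [splitRec, List.modifyHead]
        cases hsr : splitRec s rest with
        | nil => exact absurd hsr (splitRec_ne_nil s rest)
        | cons a t => simp [List.modifyHead]
      · have hp : List.isPrefixOf [s] (c :: rest) = false := by
          simp [List.isPrefixOf]; exact fun h' => hc h'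
        simp only [hp, Bool.false_eq_true, if_false]
        rw [ih _ _ _ (by simpa using Nat.le_of_succ_le_succ h)]
        have hcs : ¬ (c = s) := fun h' => hc h'.symm
        simp [splitRec, hcs, List.modifyHead]
        cases splitRec s rest <;> simp [List.modifyHead, List.append_assoc]

lemma splitOn_char (s : Char) (l : List Char) :
    PySem.Chars.splitOn l [s] = splitRec s l := by
  rw [PySem.Chars.splitOn, splitOn_go_char s _ l [] [] (by omega)]
  simp
  cases h : splitRec s l with
  | nil => exact absurd h (splitRec_ne_nil s l)
  | cons a t => simp [List.modifyHead]

lemma replace_go_char (c : Char) :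
    ∀ (fuel : Nat) (l acc : List Char), l.length ≤ fuel →
      PySem.Chars.replace.go [c] [] fuel l acc
        = acc.reverse ++ l.filter (· ≠ c) := by
  intro fuel
  induction fuel with
  | zero =>
    intro l acc h
    have : l = [] := by cases l <;> simp_all
    subst this
    simp [PySem.Chars.replace.go]
  | succ n ih =>
    intro l acc h
    cases l with
    | nil => simp [PySem.Chars.replace.go]
    | cons d t =>
      rw [PySem.Chars.replace.go]
      by_cases hd : c = d
      · subst hd
        have hp : List.isPrefixOf [c] (c :: t) = true := by simp [List.isPrefixOf]
        simp only [hp, if_pos]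
        rw [ih _ _ (by simpa using Nat.le_of_succ_le_succ h)]
        simp
      · have hp : List.isPrefixOf [c] (d :: t) = false := by
          simp [List.isPrefixOf]; exact fun h' => hd h'
        simp only [hp, Bool.false_eq_true, if_false]
        rw [ih _ _ (by simpa using Nat.le_of_succ_le_succ h)]
        have : d ≠ c := fun h' => hd h'.symm
        simp [this]

lemma replace_char (c : Char) (l : List Char) :
    PySem.Chars.replace l [c] [] = l.filter (· ≠ c) := by
  rw [PySem.Chars.replace]
  simp only [List.isEmpty_cons, Bool.false_eq_true, if_false]
  exact replace_go_char c l.length l [] (le_refl _)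

lemma isIn_singleton (c : Char) (l : List Char) :
    PySem.Chars.isIn [c] l = decide (c ∈ l) := by
  by_cases h : c ∈ l
  · simp only [h, decide_true]
    rw [PySem.Chars.isIn_iff_infix]
    exact (List.singleton_infix_iff _ _ |>.mpr h)
  · simp only [h, decide_false]
    rw [PySem.Chars.isIn_eq_false_iff]
    intro hinf
    exact h (hinf.subset (by simp))

lemma cleanB_eq (w : List Char) :
    cleanB w = (w.takeWhile (· ≠ '/')).filter (· ≠ '#') := by
  induction w with
  | nil => simp [cleanB]
  | cons c rest ih =>
    simp only [cleanB]
    by_cases h1 : c = '/'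
    · simp [h1, List.takeWhile]
    · by_cases h2 : c = '#'
      · simp [h1, h2, List.takeWhile, ih]
      · simp [h1, h2, List.takeWhile, ih]

lemma splitRec_head (s : Char) (l : List Char) :
    (splitRec s l).getD 0 [] = l.takeWhile (· ≠ s) := by
  induction l with
  | nil => simp [splitRec]
  | cons c rest ih =>
    simp only [splitRec]
    by_cases h : c = s
    · simp [h, List.takeWhile]
    · simp only [h, if_false, List.takeWhile]
      cases hr : splitRec s rest with
      | nil => exact absurd hr (splitRec_ne_nil s rest)
      | cons a t =>
        rw [hr] at ih
        simp_all [List.modifyHead]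

lemma takeWhile_filter_comm (w : List Char) :
    (w.filter (· ≠ '#')).takeWhile (· ≠ '/') = (w.takeWhile (· ≠ '/')).filter (· ≠ '#') := by
  induction w with
  | nil => simp
  | cons c rest ih =>
    by_cases h1 : c = '/'
    · simp [h1, List.takeWhile]
    · by_cases h2 : c = '#'
      · simp_all [List.takeWhile]
      · simp_all [List.takeWhile]

lemma takeWhile_of_not_mem (w : List Char) (h : '/' ∉ w) :
    w.takeWhile (· ≠ '/') = w := by
  induction w with
  | nil => simp
  | cons c rest ih =>
    simp only [List.mem_cons, not_or] at h
    rw [List.takeWhile_cons_of_pos (by simp [Ne.symm h.1]), ih h.2]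

lemma cleanA_eq_cleanB (w : List Char) : cleanA w = cleanB w := by
  rw [cleanA, cleanB_eq]
  simp only [replace_char, isIn_singleton]
  by_cases h : '/' ∈ w.filter (· ≠ '#')
  · simp only [h, decide_true, if_pos]
    rw [splitOn_char, PySem.List.pyGetD_zero, splitRec_head]
    exact takeWhile_filter_comm w
  · simp only [h, decide_false, Bool.false_eq_true, if_false]
    have hw : '/' ∉ w := fun hmem => h (List.mem_filter.mpr ⟨hmem, by decide⟩)
    rw [takeWhile_of_not_mem w hw]

lemma loop_eq : ∀ (cs cur : List Char),
    loopA ((splitRec ' ' cs).modifyHead (cur ++ ·))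
      = Option.map cleanB (loopB cs cur (decide ('/' ∈ cur) || decide ('#' ∈ cur))) := by
  intro cs
  induction cs with
  | nil =>
    intro cur
    simp only [splitRec, List.modifyHead, List.append_nil, loopA, loopB, isIn_singleton]
    cases hb : (decide ('/' ∈ cur) || decide ('#' ∈ cur)) <;>
      simp [cleanA_eq_cleanB]
  | cons c cs ih =>
    intro cur
    by_cases hc : c = ' '
    · subst hc
      have hsplit : (splitRec ' ' (' ' :: cs)).modifyHead (cur ++ ·) = cur :: splitRec ' ' cs := by
        simp [splitRec, List.modifyHead]
      rw [hsplit, loopA]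
      simp only [isIn_singleton, loopB, if_pos rfl]
      cases hb : (decide ('/' ∈ cur) || decide ('#' ∈ cur))
      · simp only [hb, Bool.false_eq_true, if_false]
        have h0 : ∀ (L : List (List Char)), L.modifyHead (fun x => x) = L := by
          intro L; cases L <;> simp [List.modifyHead]
        have := ih []
        simpa [h0] using this
      · simp [hb, cleanA_eq_cleanB]
    · rw [show splitRec ' ' (c :: cs) = (splitRec ' ' cs).modifyHead (c :: ·) by
          simp [splitRec, hc]]
      rw [List.modifyHead_modifyHead]
      rw [show ((fun w => cur ++ w) ∘ (fun w => c :: w)) = (fun w => (cur ++ [c]) ++ w) by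
          funext w; simp]
      rw [ih (cur ++ [c])]
      simp only [loopB, hc, if_false]
      congr 1
      by_cases hm : (c = '#' ∨ c = '/')
      · rcases hm with hm | hm <;> simp [hm]
      · have h1 : ¬ ('/' = c) := fun h => hm (Or.inr h.symm)
        have h2 : ¬ ('#' = c) := fun h => hm (Or.inl h.symm)
        simp [h1, h2, hm]

lemma get_card_id_eq_alt (title : String) : get_card_id title = get_card_id_alt title := by
  rw [get_card_id, get_card_id_alt, splitOn_char]
  have h := loop_eq title.toList []
  have h0 : ∀ (L : List (List Char)), L.modifyHead (fun x => [] ++ x) = L := by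
    intro L; cases L <;> simp [List.modifyHead]
  rw [h0] at h
  simp only [List.not_mem_nil, decide_false, Bool.or_self] at h
  rw [h, Option.map_map]
  rfl

-- ===== VERDICT (by name: the statement is the Claim_ definition above) =====
theorem get_card_id_spec : Claim_equal_get_card_id := by
  intro title _
  unfold Spec_get_card_id
  exact get_card_id_eq_alt title
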